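-- pv_equiv track=rewrite | github.com/open-spaced-repetition/srs-benchmark | plot_forgetting_curve.py | split_base_name
-- ===== SOURCE A (Python) =====
-- SUPPORTED_MODELS = (
--     "FSRSv1",
--     "FSRSv2",
--     "FSRSv3",
--     "FSRSv4",
--     "FSRS-4.5",
--     "FSRS-5",
--     "FSRS-6",
--     "FSRS-6-one-step",
--     "SM2-trainable",
--     "Anki",
--     "HLR",
--     "ACT-R",
--     "DASH",
--     "LSTM",
-- )
--
-- def split_base_name(base_name: str) -> tuple[str, str]:
--     normalized = base_name.strip()
--     for candidate in sorted(SUPPORTED_MODELS, key=len, reverse=True):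
--         if normalized.startswith(candidate):
--             suffix = normalized[len(candidate) :]
--             return candidate, suffix
--     raise ValueError(
--         f"Unable to determine model name for '{base_name}'. Expected one of {SUPPORTED_MODELS} prefixes."
--     )
-- ===== SOURCE B (Python) =====
-- SUPPORTED_MODELS = (
--     "FSRSv1",
--     "FSRSv2",
--     "FSRSv3",
--     "FSRSv4",
--     "FSRS-4.5",
--     "FSRS-5",
--     "FSRS-6",
--     "FSRS-6-one-step",
--     "SM2-trainable",
--     "Anki",
--     "HLR",
--     "ACT-R",
--     "DASH",
--     "LSTM",
-- )
--
-- def split_base_name(base_name: str) -> tuple[str, str]: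
--     normalized = base_name.strip()
--     matches = [c for c in SUPPORTED_MODELS if normalized.startswith(c)]
--     if not matches:
--         raise ValueError(
--             f"Unable to determine model name for '{base_name}'. Expected one of {SUPPORTED_MODELS} prefixes."
--         )
--     best = max(matches, key=len)
--     return best, normalized[len(best):]
-- ===== Notes on version B (the rewrite author's own statement) =====
-- stated objective: simpler
-- what changed: Replaces A's sort-by-length-then-first-hit scan with a single unsorted filter of the candidate prefixes followed by max(key=len), removing the pre-sort while keeping longest-prefix semantics.
import Mathlib
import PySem

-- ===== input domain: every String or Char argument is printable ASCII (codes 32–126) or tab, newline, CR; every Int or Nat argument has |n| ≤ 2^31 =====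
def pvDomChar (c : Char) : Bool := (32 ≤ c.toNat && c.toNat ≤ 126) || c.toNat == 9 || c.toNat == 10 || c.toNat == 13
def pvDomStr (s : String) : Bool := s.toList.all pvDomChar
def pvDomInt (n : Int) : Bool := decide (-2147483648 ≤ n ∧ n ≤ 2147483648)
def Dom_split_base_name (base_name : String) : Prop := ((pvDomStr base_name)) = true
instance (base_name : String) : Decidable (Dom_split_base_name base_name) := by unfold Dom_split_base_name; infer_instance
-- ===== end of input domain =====

-- B drops A's pre-sort of the candidate list: it filters the unsorted constants for prefixes of
-- the stripped name and takes max(matches, key=len) — simpler control flow, same longest-prefix result.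
-- Where no candidate matches, Python A (and B) raise ValueError: those inputs are outside Pre_ and
-- both ports return ("", "") there (nothing is claimed about them).

-- ===== PORT A =====
def pvSupportedModels : List String :=
  ["FSRSv1", "FSRSv2", "FSRSv3", "FSRSv4", "FSRS-4.5", "FSRS-5", "FSRS-6",
   "FSRS-6-one-step", "SM2-trainable", "Anki", "HLR", "ACT-R", "DASH", "LSTM"]

-- A's for-loop over the sorted candidates: first candidate that is a prefix; [] = the raise branch
def pvFindA (normalized : String) : List String → String × String
  | [] => ("", "")
  | candidate :: rest =>
    if PySem.Str.startswith normalized candidate then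
      (candidate, PySem.Str.slice normalized (some (PySem.Str.len candidate)) none)
    else pvFindA normalized rest

def split_base_name (base_name : String) : String × String :=
  let normalized := PySem.Str.strip base_name
  pvFindA normalized (PySem.List.sorted pvSupportedModels (fun c => PySem.Str.len c) true)

-- ===== PORT B =====
def split_base_name_alt (base_name : String) : String × String :=
  let normalized := PySem.Str.strip base_name
  let ms := pvSupportedModels.filter (fun c => PySem.Str.startswith normalized c)
  match PySem.List.max? ms (fun c => PySem.Str.len c) with
  | none => ("", "")  -- Python B raises ValueError here (outside Pre_)
  | some best => (best, PySem.Str.slice normalized (some (PySem.Str.len best)) none)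

-- ===== PRECONDITION & SPEC =====
-- Pre_ excludes exactly the inputs on which Python A raises ValueError: no supported model
-- name is a prefix of the stripped input.
def Pre_split_base_name (base_name : String) : Prop :=
  (pvSupportedModels.any (fun c => PySem.Str.startswith (PySem.Str.strip base_name) c)) = true
instance (base_name : String) : Decidable (Pre_split_base_name base_name) := by
  unfold Pre_split_base_name; infer_instance

def pvWitness_split_base_name : String := "FSRS-4.5"

def Spec_split_base_name (base_name : String) (out : String × String) : Prop := out = split_base_name_alt base_name
instance (base_name : String) (out : String × String) : Decidable (Spec_split_base_name base_name out) := by unfold Spec_split_base_name; infer_instance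

-- ===== CLAIM (what is proved, stated in full; the proofs are below) =====
def Claim_equal_split_base_name : Prop := ∀ (base_name : String), Dom_split_base_name base_name → Pre_split_base_name base_name → Spec_split_base_name base_name (split_base_name base_name)

-- ===== LEMMAS AND PROOFS =====

-- two equally long prefixes of the same string are equal
lemma pv_pfx_eq (s a b : String) (ha : PySem.Str.startswith s a = true)
    (hb : PySem.Str.startswith s b = true)
    (hl : PySem.Str.len a = PySem.Str.len b) : a = b := by
  rw [PySem.Str.startswith_eq, PySem.Chars.startswith_iff] at ha hb
  rw [PySem.Str.len_eq, PySem.Str.len_eq, Int.natCast_inj] at hl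
  exact String.toList_inj.mp ((List.prefix_of_prefix_length_le ha hb (le_of_eq hl)).eq_of_length hl)

-- A's scan: on a length-descending list, the first prefix hit is any prefix of maximal length
lemma pv_findA_first (s m : String) (K : List String)
    (hpair : K.Pairwise (fun a b => PySem.Str.len b ≤ PySem.Str.len a))
    (hmem : m ∈ K) (hpm : PySem.Str.startswith s m = true)
    (hmax : ∀ y ∈ K, PySem.Str.startswith s y = true → PySem.Str.len y ≤ PySem.Str.len m) :
    pvFindA s K = (m, PySem.Str.slice s (some (PySem.Str.len m)) none) := by
  induction K with
  | nil => cases hmem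
  | cons h t ih =>
    obtain ⟨hh, ht⟩ := List.pairwise_cons.mp hpair
    by_cases hph : PySem.Str.startswith s h = true
    · have hhm : h = m := by
        rcases List.mem_cons.mp hmem with rfl | hmt
        · rfl
        · exact pv_pfx_eq s h m hph hpm
            (le_antisymm (hmax h List.mem_cons_self hph) (hh m hmt))
      subst hhm
      simp only [pvFindA, if_pos hph]
    · have hmt : m ∈ t := by
        rcases List.mem_cons.mp hmem with rfl | hmt
        · exact absurd hpm hph
        · exact hmt
      simp only [pvFindA, if_neg hph]
      exact ih ht hmt (fun y hy hpy => hmax y (List.mem_cons_of_mem h hy) hpy)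

-- ===== VERDICT (by name: the statement is the Claim_ definition above) =====
theorem split_base_name_spec : Claim_equal_split_base_name := by
  intro base_name _hdom hpre
  unfold Pre_split_base_name at hpre
  unfold Spec_split_base_name
  simp only [split_base_name, split_base_name_alt]
  set s := PySem.Str.strip base_name
  obtain ⟨w, hw, hpw⟩ := List.any_eq_true.mp hpre
  cases hm : PySem.List.max?
      (pvSupportedModels.filter (fun c => PySem.Str.startswith s c))
      (fun c => PySem.Str.len c) with
  | none =>
      rw [PySem.List.max?_eq_none_iff] at hm
      have : w ∈ pvSupportedModels.filter (fun c => PySem.Str.startswith s c) :=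
        List.mem_filter.mpr ⟨hw, hpw⟩
      rw [hm] at this
      cases this
  | some m =>
      obtain ⟨hmL, hpm⟩ := List.mem_filter.mp (PySem.List.max?_mem hm)
      have hisMax := PySem.List.max?_isMax hm
      exact pv_findA_first s m _
        (PySem.List.sorted_pairwise_rev pvSupportedModels (fun c => PySem.Str.len c))
        ((PySem.List.mem_sorted pvSupportedModels (fun c => PySem.Str.len c) true m).mpr hmL)
        hpm
        (fun y hy hpy => hisMax y
          (List.mem_filter.mpr
            ⟨(PySem.List.mem_sorted pvSupportedModels (fun c => PySem.Str.len c) true y).mp hy, hpy⟩))
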